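-- pv_equiv track=rewrite | github.com/balbright0-beep/INEOS_Incentive_App | backend/app/services/geo.py | zip_to_state
-- ===== SOURCE A (Python) =====
-- ZIP_RANGES = [
--     ("005", "009", "NY"), ("010", "027", "MA"), ("028", "029", "RI"),
--     ("030", "038", "NH"), ("039", "049", "ME"), ("050", "059", "VT"),
--     ("060", "069", "CT"), ("070", "089", "NJ"), ("090", "099", "AE"),
--     ("100", "149", "NY"), ("150", "196", "PA"), ("197", "199", "DE"),
--     ("200", "205", "DC"), ("206", "219", "MD"), ("220", "246", "VA"),
--     ("247", "268", "WV"), ("270", "289", "NC"), ("290", "299", "SC"),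
--     ("300", "319", "GA"), ("320", "339", "FL"), ("340", "349", "AA"),
--     ("350", "369", "AL"), ("370", "385", "TN"), ("386", "397", "MS"),
--     ("400", "418", "KY"), ("420", "427", "KY"), ("430", "458", "OH"),
--     ("460", "479", "IN"), ("480", "499", "MI"), ("500", "528", "IA"),
--     ("530", "549", "WI"), ("550", "567", "MN"), ("570", "577", "SD"),
--     ("580", "588", "ND"), ("590", "599", "MT"), ("600", "629", "IL"),
--     ("630", "658", "MO"), ("660", "679", "KS"), ("680", "693", "NE"),
--     ("700", "714", "LA"), ("716", "729", "AR"), ("730", "749", "OK"),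
--     ("750", "799", "TX"), ("800", "816", "CO"), ("820", "831", "WY"),
--     ("832", "838", "ID"), ("840", "847", "UT"), ("850", "865", "AZ"),
--     ("870", "884", "NM"), ("889", "898", "NV"), ("900", "935", "CA"),
--     ("936", "966", "CA"), ("967", "968", "HI"), ("970", "979", "OR"),
--     ("980", "994", "WA"), ("995", "999", "AK"),
-- ]
--
-- def zip_to_state(zip_code: str) -> str | None:
--     """Convert a ZIP code to a 2-letter state abbreviation."""
--     if not zip_code:
--         return None
--     clean = zip_code.strip().replace("-", "")[:5]
--     if len(clean) < 3 or not clean.isdigit():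
--         return None
--     prefix = clean[:3]
--     for start, end, state in ZIP_RANGES:
--         if start <= prefix <= end:
--             return state
--     return None
-- ===== SOURCE B (Python) =====
-- # Flattened sorted boundary table: entry (k, v) means every 3-digit prefix value
-- # n with k <= n < next key maps to v (None = uncovered gap).  Adjacent ranges
-- # with the same state are merged; gaps carry an explicit None entry.
-- _BOUNDARIES = [
--     (5, "NY"), (10, "MA"), (28, "RI"), (30, "NH"), (39, "ME"), (50, "VT"),
--     (60, "CT"), (70, "NJ"), (90, "AE"), (100, "NY"), (150, "PA"), (197, "DE"),
--     (200, "DC"), (206, "MD"), (220, "VA"), (247, "WV"), (269, None),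
--     (270, "NC"), (290, "SC"), (300, "GA"), (320, "FL"), (340, "AA"),
--     (350, "AL"), (370, "TN"), (386, "MS"), (398, None), (400, "KY"),
--     (419, None), (420, "KY"), (428, None), (430, "OH"), (459, None),
--     (460, "IN"), (480, "MI"), (500, "IA"), (529, None), (530, "WI"),
--     (550, "MN"), (568, None), (570, "SD"), (578, None), (580, "ND"),
--     (589, None), (590, "MT"), (600, "IL"), (630, "MO"), (659, None),
--     (660, "KS"), (680, "NE"), (694, None), (700, "LA"), (715, None),
--     (716, "AR"), (730, "OK"), (750, "TX"), (800, "CO"), (817, None),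
--     (820, "WY"), (832, "ID"), (839, None), (840, "UT"), (848, None),
--     (850, "AZ"), (866, None), (870, "NM"), (885, None), (889, "NV"),
--     (899, None), (900, "CA"), (967, "HI"), (969, None), (970, "OR"),
--     (980, "WA"), (995, "AK"),
-- ]
--
--
-- def _lookup(prefix):
--     """Value attached to the last boundary key <= int(prefix)."""
--     n = int(prefix)
--     state = None
--     for k, v in _BOUNDARIES:
--         if k > n:
--             break
--         state = v
--     return state
--
--
-- def zip_to_state(zip_code: str) -> str | None:
--     """Convert a ZIP code to a 2-letter state abbreviation."""
--     if not zip_code: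
--         return None
--     clean = zip_code.strip().replace("-", "")[:5]
--     if len(clean) < 3 or not clean.isdigit():
--         return None
--     return _lookup(clean[:3])
-- ===== Notes on version B (the rewrite author's own statement) =====
-- stated objective: alternative
-- what changed: Replaces A's per-call first-match scan comparing the string prefix against 56 (start,end) string ranges by a flattened sorted integer boundary table (adjacent same-state ranges merged, gaps explicit None entries): the prefix is converted with int() once and the value of the last boundary key <= it is returned.
import Mathlib
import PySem

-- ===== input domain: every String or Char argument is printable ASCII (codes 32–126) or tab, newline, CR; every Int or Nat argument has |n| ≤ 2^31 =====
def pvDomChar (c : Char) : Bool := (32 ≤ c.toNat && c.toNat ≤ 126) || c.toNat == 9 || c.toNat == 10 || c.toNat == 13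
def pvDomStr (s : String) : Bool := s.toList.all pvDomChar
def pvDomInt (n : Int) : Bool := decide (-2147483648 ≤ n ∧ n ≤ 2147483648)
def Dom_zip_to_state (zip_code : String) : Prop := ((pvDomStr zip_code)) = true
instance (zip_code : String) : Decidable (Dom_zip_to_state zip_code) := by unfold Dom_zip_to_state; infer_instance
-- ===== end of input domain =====

-- B replaces A's per-call first-match scan over 56 string ZIP ranges by an integer
-- lookup in a flattened sorted boundary table (merged ranges, explicit None gaps):
-- convert the 3-digit prefix with int() once, then take the value of the last
-- boundary key <= it.  Same validation, same results; an alternative data structure.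


-- ===== PORT A =====
def ZIP_RANGES : List (String × String × String) := [
  ("005", "009", "NY"), ("010", "027", "MA"), ("028", "029", "RI"),
  ("030", "038", "NH"), ("039", "049", "ME"), ("050", "059", "VT"),
  ("060", "069", "CT"), ("070", "089", "NJ"), ("090", "099", "AE"),
  ("100", "149", "NY"), ("150", "196", "PA"), ("197", "199", "DE"),
  ("200", "205", "DC"), ("206", "219", "MD"), ("220", "246", "VA"),
  ("247", "268", "WV"), ("270", "289", "NC"), ("290", "299", "SC"),
  ("300", "319", "GA"), ("320", "339", "FL"), ("340", "349", "AA"),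
  ("350", "369", "AL"), ("370", "385", "TN"), ("386", "397", "MS"),
  ("400", "418", "KY"), ("420", "427", "KY"), ("430", "458", "OH"),
  ("460", "479", "IN"), ("480", "499", "MI"), ("500", "528", "IA"),
  ("530", "549", "WI"), ("550", "567", "MN"), ("570", "577", "SD"),
  ("580", "588", "ND"), ("590", "599", "MT"), ("600", "629", "IL"),
  ("630", "658", "MO"), ("660", "679", "KS"), ("680", "693", "NE"),
  ("700", "714", "LA"), ("716", "729", "AR"), ("730", "749", "OK"),
  ("750", "799", "TX"), ("800", "816", "CO"), ("820", "831", "WY"),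
  ("832", "838", "ID"), ("840", "847", "UT"), ("850", "865", "AZ"),
  ("870", "884", "NM"), ("889", "898", "NV"), ("900", "935", "CA"),
  ("936", "966", "CA"), ("967", "968", "HI"), ("970", "979", "OR"),
  ("980", "994", "WA"), ("995", "999", "AK")]

-- A's for-loop: first range with start <= prefix <= end (Python str comparison is
-- code-point lexicographic = Lean's ≤ on .toList, exact per PySem)
def scanRanges (pre : List Char) : List (String × String × String) → Option String
  | [] => none
  | (s, e, st) :: rest =>
      if s.toList ≤ pre ∧ pre ≤ e.toList then some st else scanRanges pre rest

def zip_to_state (zip_code : String) : Option String :=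
  if zip_code = "" then none
  else
    let clean := PySem.Chars.slice
      (PySem.Chars.replace (PySem.Chars.strip zip_code.toList) ['-'] []) none (some 5)
    if PySem.Chars.len clean < 3 ∨ PySem.Chars.strIsdigit clean = false then none
    else scanRanges (PySem.Chars.slice clean none (some 3)) ZIP_RANGES

-- ===== PORT B =====
-- _BOUNDARIES: flattened sorted table; (k, v) covers prefix values from k to the
-- next key (exclusive); none marks an uncovered gap
def BOUNDARIES : List (Int × Option String) := [
  (5, some "NY"), (10, some "MA"), (28, some "RI"), (30, some "NH"),
  (39, some "ME"), (50, some "VT"), (60, some "CT"), (70, some "NJ"),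
  (90, some "AE"), (100, some "NY"), (150, some "PA"), (197, some "DE"),
  (200, some "DC"), (206, some "MD"), (220, some "VA"), (247, some "WV"),
  (269, none), (270, some "NC"), (290, some "SC"), (300, some "GA"),
  (320, some "FL"), (340, some "AA"), (350, some "AL"), (370, some "TN"),
  (386, some "MS"), (398, none), (400, some "KY"), (419, none),
  (420, some "KY"), (428, none), (430, some "OH"), (459, none),
  (460, some "IN"), (480, some "MI"), (500, some "IA"), (529, none),
  (530, some "WI"), (550, some "MN"), (568, none), (570, some "SD"),
  (578, none), (580, some "ND"), (589, none), (590, some "MT"),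
  (600, some "IL"), (630, some "MO"), (659, none), (660, some "KS"),
  (680, some "NE"), (694, none), (700, some "LA"), (715, none),
  (716, some "AR"), (730, some "OK"), (750, some "TX"), (800, some "CO"),
  (817, none), (820, some "WY"), (832, some "ID"), (839, none),
  (840, some "UT"), (848, none), (850, some "AZ"), (866, none),
  (870, some "NM"), (885, none), (889, some "NV"), (899, none),
  (900, some "CA"), (967, some "HI"), (969, none), (970, some "OR"),
  (980, some "WA"), (995, some "AK")]

-- Source B's for-loop with break: keep the value of the last key <= n
def boundaryScan (n : Int) : List (Int × Option String) → Option String → Option String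
  | [], state => state
  | (k, v) :: rest, state =>
      if k > n then state else boundaryScan n rest v

-- Source B's _lookup(prefix): n = int(prefix), then the boundary scan; int() cannot
-- raise on the all-digit prefix this is called with, so the none arm is unreachable
def altLookup (p : List Char) : Option String :=
  match PySem.Int.ofChars? p with
  | some n => boundaryScan n BOUNDARIES none
  | none => none

def zip_to_state_alt (zip_code : String) : Option String :=
  if zip_code = "" then none
  else
    let clean := PySem.Chars.slice
      (PySem.Chars.replace (PySem.Chars.strip zip_code.toList) ['-'] []) none (some 5)
    if PySem.Chars.len clean < 3 ∨ PySem.Chars.strIsdigit clean = false then none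
    else altLookup (PySem.Chars.slice clean none (some 3))

-- ===== PRECONDITION & SPEC =====
def Spec_zip_to_state (zip_code : String) (out : Option String) : Prop := out = zip_to_state_alt zip_code
instance (zip_code : String) (out : Option String) : Decidable (Spec_zip_to_state zip_code out) := by unfold Spec_zip_to_state; infer_instance

-- ===== CLAIM (what is proved, stated in full; the proofs are below) =====
def Claim_equal_zip_to_state : Prop := ∀ (zip_code : String), Dom_zip_to_state zip_code → Spec_zip_to_state zip_code (zip_to_state zip_code)

-- ===== LEMMAS AND PROOFS =====

-- the 3-digit prefix with value n (0 ≤ n < 1000)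
def digits3 (n : Nat) : List Char :=
  [Char.ofNat (48 + n / 100), Char.ofNat (48 + n / 10 % 10), Char.ofNat (48 + n % 10)]

-- the two lookups agree on every possible 3-digit prefix (checked exhaustively)
set_option maxRecDepth 100000 in
set_option maxHeartbeats 4000000 in
theorem key_lemma :
    ((List.range 1000).all
      (fun n => scanRanges (digits3 n) ZIP_RANGES == altLookup (digits3 n))) = true := by
  decide

-- a digit character is reconstructed from its value
theorem digit_recon (c : Char) (h1 : 48 ≤ c.toNat) (h2 : c.toNat ≤ 57) :
    Char.ofNat (48 + (c.toNat - 48)) = c := by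
  have h : 48 + (c.toNat - 48) = c.toNat := by omega
  rw [h, Char.ofNat_toNat]

theorem digit_bounds (c : Char) (h : PySem.Chars.isdigit c = true) :
    48 ≤ c.toNat ∧ c.toNat ≤ 57 := by
  simp only [PySem.Chars.isdigit, Bool.and_eq_true, decide_eq_true_eq, Char.le_def,
    UInt32.le_iff_toNat_le] at h
  exact h

-- on any 3-char all-digit prefix the two lookups agree
theorem lookup_eq (a b c : Char)
    (ha : PySem.Chars.isdigit a = true) (hb : PySem.Chars.isdigit b = true)
    (hc : PySem.Chars.isdigit c = true) :
    scanRanges [a, b, c] ZIP_RANGES = altLookup [a, b, c] := by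
  obtain ⟨ha1, ha2⟩ := digit_bounds a ha
  obtain ⟨hb1, hb2⟩ := digit_bounds b hb
  obtain ⟨hc1, hc2⟩ := digit_bounds c hc
  set n : Nat := 100 * (a.toNat - 48) + 10 * (b.toNat - 48) + (c.toNat - 48) with hn
  have hd : digits3 n = [a, b, c] := by
    have e1 : 48 + n / 100 = 48 + (a.toNat - 48) := by omega
    have e2 : 48 + n / 10 % 10 = 48 + (b.toNat - 48) := by omega
    have e3 : 48 + n % 10 = 48 + (c.toNat - 48) := by omega
    simp only [digits3, e1, e2, e3, digit_recon a ha1 ha2, digit_recon b hb1 hb2,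
      digit_recon c hc1 hc2]
  have hmem : n ∈ List.range 1000 := List.mem_range.mpr (by omega)
  have := List.all_eq_true.mp key_lemma n hmem
  rw [hd] at this
  exact eq_of_beq this

-- ===== VERDICT (by name: the statement is the Claim_ definition above) =====
theorem zip_to_state_spec : Claim_equal_zip_to_state := by
  intro zip_code _
  unfold Spec_zip_to_state
  simp only [zip_to_state, zip_to_state_alt]
  by_cases h1 : zip_code = ""
  · simp [h1]
  · rw [if_neg h1, if_neg h1]
    set clean := PySem.Chars.slice
      (PySem.Chars.replace (PySem.Chars.strip zip_code.toList) ['-'] []) none (some 5)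
      with hcl
    by_cases h2 : PySem.Chars.len clean < 3 ∨ PySem.Chars.strIsdigit clean = false
    · rw [if_pos h2, if_pos h2]
    · rw [if_neg h2, if_neg h2]
      push Not at h2
      obtain ⟨hlen, hdig⟩ := h2
      have hdig' : PySem.Chars.strIsdigit clean = true := by
        cases h : PySem.Chars.strIsdigit clean
        · exact absurd h hdig
        · rfl
      have hall : ∀ x ∈ clean, PySem.Chars.isdigit x = true := by
        simp only [PySem.Chars.strIsdigit, Bool.and_eq_true, List.all_eq_true] at hdig'
        exact hdig'.2
      have hlen' : 3 ≤ clean.length := by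
        simp only [PySem.Chars.len] at hlen
        omega
      have hsl : PySem.Chars.slice clean none (some 3) = clean.take 3 := by
        simp [PySem.Chars.slice, PySem.List.slice_to]
      match clean, hlen', hall, hsl with
      | x :: y :: z :: rest, _, hall, hsl =>
        rw [hsl]
        simp only [List.take]
        exact lookup_eq x y z (hall x (by simp)) (hall y (by simp)) (hall z (by simp))
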